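-- pv_equiv track=rewrite | github.com/google/filament | third_party/dawn/third_party/swiftshader/third_party/llvm-16.0/scripts/generate_build_files.py | partition_paths
-- ===== SOURCE A (Python) =====
-- def get_filename(path):
--         return path.split("/")[-1]
--
-- def partition_paths(filepaths):
--     partitions = []
--     for path in filepaths:
--         # Convert to lower case to support case-insensitive filesystem
--         filename = get_filename(path).lower()
--         inserted = False
--         for partition in partitions:
--             if not filename in partition:
--                 partition[filename] = path
--                 inserted = True
--                 break
--         if not inserted:
--             new_partition = {filename : path}
--             partitions.append(new_partition)
--     return [[p for f, p in partition.items()] for partition in partitions]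
-- ===== SOURCE B (Python) =====
-- def partition_paths(filepaths):
--     counts = {}
--     partitions = []
--     for path in filepaths:
--         # Convert to lower case to support case-insensitive filesystem
--         filename = path.split("/")[-1].lower()
--         k = counts.get(filename, 0)
--         counts[filename] = k + 1
--         if k == len(partitions):
--             partitions.append([path])
--         else:
--             partitions[k].append(path)
--     return partitions
-- ===== Notes on version B (the rewrite author's own statement) =====
-- stated objective: faster
-- what changed: Replaces A's first-fit linear scan over all existing partitions for every path by a per-filename occurrence counter (dict) that indexes the target partition directly, appending paths to indexed lists instead of maintaining per-partition dicts.
import Mathlib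
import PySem

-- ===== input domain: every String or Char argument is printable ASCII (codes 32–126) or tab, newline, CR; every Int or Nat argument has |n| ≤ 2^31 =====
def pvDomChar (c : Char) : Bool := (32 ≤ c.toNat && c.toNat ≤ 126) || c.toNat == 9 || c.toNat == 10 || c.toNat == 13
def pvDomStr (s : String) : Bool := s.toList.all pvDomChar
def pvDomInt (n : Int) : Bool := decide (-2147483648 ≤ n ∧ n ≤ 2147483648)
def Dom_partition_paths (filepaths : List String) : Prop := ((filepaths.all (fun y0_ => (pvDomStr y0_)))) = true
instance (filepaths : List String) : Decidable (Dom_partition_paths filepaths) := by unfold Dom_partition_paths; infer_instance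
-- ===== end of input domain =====

-- B replaces A's linear scan over all partitions per path by a per-filename occurrence
-- counter that indexes the target partition directly (objective: faster, O(total) vs O(n^2)).

-- ===== PORT A =====
-- get_filename(path).lower(); split? "/" is always some and nonempty, so the two defaults are unreachable
def pvFilename (path : String) : String :=
  PySem.Str.lower ((PySem.List.pyGet? ((PySem.Str.split? path "/").getD []) (-1)).getD "")

-- the inner 'for partition in partitions: if not filename in partition: …; break' with the
-- trailing 'if not inserted: partitions.append({filename: path})'
def pvAInsert (partitions : List (PySem.Dict String String)) (filename path : String) :
    List (PySem.Dict String String) :=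
  match partitions with
  | [] => [PySem.Dict.empty.insert filename path]
  | d :: rest =>
      if d.contains filename then d :: pvAInsert rest filename path
      else (d.insert filename path) :: rest

def partition_paths (filepaths : List String) : List (List String) :=
  (filepaths.foldl (fun pds path => pvAInsert pds (pvFilename path) path) []).map
    (fun p => p.items.map (fun fp => fp.2))

-- ===== PORT B =====
-- one step of B's loop: k = counts.get(filename, 0); counts[filename] = k + 1;
-- append to partitions[k] (k is always ≥ 0, so k.toNat is exact) or start a new partition
def pvBStep (st : PySem.Dict String Int × List (List String)) (path : String) :
    PySem.Dict String Int × List (List String) :=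
  let filename := pvFilename path
  let k := st.1.getD filename 0
  let counts := st.1.insert filename (k + 1)
  if k == (st.2.length : Int) then (counts, st.2 ++ [[path]])
  else (counts, st.2.set k.toNat ((st.2.getD k.toNat []) ++ [path]))

def partition_paths_alt (filepaths : List String) : List (List String) :=
  (filepaths.foldl pvBStep (PySem.Dict.empty, [])).2

-- ===== PRECONDITION & SPEC =====
def Spec_partition_paths (filepaths : List String) (out : List (List String)) : Prop := out = partition_paths_alt filepaths
instance (filepaths : List String) (out : List (List String)) : Decidable (Spec_partition_paths filepaths out) := by unfold Spec_partition_paths; infer_instance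

-- ===== CLAIM (what is proved, stated in full; the proofs are below) =====
def Claim_equal_partition_paths : Prop := ∀ (filepaths : List String), Dom_partition_paths filepaths → Spec_partition_paths filepaths (partition_paths filepaths)

-- ===== LEMMAS AND PROOFS =====

-- the values row of a partition
def pvVals (d : PySem.Dict String String) : List String := d.items.map (fun fp => fp.2)

-- invariant tying A's list of dicts to B's counter: for every filename f there is n with
-- counts[f] = n and exactly the first n partitions contain f
def pvInv (pds : List (PySem.Dict String String)) (counts : PySem.Dict String Int) : Prop :=
  ∀ f : String, ∃ n : Nat, n ≤ pds.length ∧ counts.getD f 0 = (n : Int) ∧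
    pds.map (fun d => d.contains f) = List.replicate n true ++ List.replicate (pds.length - n) false

theorem pvAInsert_full (pds : List (PySem.Dict String String)) (f p : String)
    (h : pds.map (fun d => d.contains f) = List.replicate pds.length true) :
    pvAInsert pds f p = pds ++ [PySem.Dict.empty.insert f p] := by
  induction pds with
  | nil => rfl
  | cons d rest ih =>
      simp only [List.map_cons, List.length_cons, List.replicate_succ] at h
      obtain ⟨h1, h2⟩ := List.cons.injEq .. ▸ h
      simp [pvAInsert, h1, ih h2]

theorem pvAInsert_at (pds : List (PySem.Dict String String)) (f p : String) (n : Nat)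
    (hn : n < pds.length)
    (h : pds.map (fun d => d.contains f)
        = List.replicate n true ++ List.replicate (pds.length - n) false) :
    pvAInsert pds f p = pds.set n ((pds.getD n PySem.Dict.empty).insert f p) := by
  induction pds generalizing n with
  | nil => simp at hn
  | cons d rest ih =>
      cases n with
      | zero =>
          have hlen : rest.length + 1 - 0 = rest.length + 1 := by omega
          simp only [List.map_cons, List.length_cons, hlen, List.replicate_succ,
            List.replicate_zero, List.nil_append] at h
          obtain ⟨h1, _⟩ := List.cons.injEq .. ▸ h
          simp [pvAInsert, h1]
      | succ m =>
          simp only [List.map_cons, List.length_cons, List.replicate_succ,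
            List.cons_append] at h
          obtain ⟨h1, h2⟩ := List.cons.injEq .. ▸ h
          have hm : m < rest.length := by simpa using hn
          have h2' : rest.map (fun d => d.contains f)
              = List.replicate m true ++ List.replicate (rest.length - m) false := by
            have : rest.length + 1 - (m + 1) = rest.length - m := by omega
            rwa [this] at h2
          simp [pvAInsert, h1, ih m hm h2']

-- the partition at index n does not contain f yet
theorem pv_not_contains (pds : List (PySem.Dict String String)) (f : String) (n : Nat)
    (hn : n < pds.length)
    (h : pds.map (fun d => d.contains f)
        = List.replicate n true ++ List.replicate (pds.length - n) false) :
    (pds.getD n PySem.Dict.empty).contains f = false := by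
  have hR : (List.replicate n true ++ List.replicate (pds.length - n) false)[n]?
      = some false := by
    rw [List.getElem?_append_right (by simp)]
    simp [List.getElem?_replicate]
    omega
  have h2 : (pds.map (fun d => d.contains f))[n]? = some false := by rw [h]; exact hR
  rw [List.getElem?_map, List.getElem?_eq_getElem hn] at h2
  simp only [Option.map_some, Option.some.injEq] at h2
  simpa [List.getD_eq_getElem?_getD, List.getElem?_eq_getElem hn] using h2

theorem pv_set_boundary (n m : Nat) (hn : n < m) :
    (List.replicate n true ++ List.replicate (m - n) false).set n true
      = List.replicate (n + 1) true ++ List.replicate (m - (n + 1)) false := by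
  have h1 : m - n = (m - (n + 1)) + 1 := by omega
  rw [List.set_append, if_neg (by simp), h1, List.replicate_succ]
  simp [List.replicate_succ', List.append_assoc]

theorem pv_set_self {α : Type} (xs : List α) (n : Nat) (a : α) (hn : n < xs.length)
    (ha : xs[n]? = some a) : xs.set n a = xs := by
  rw [List.getElem?_eq_getElem hn] at ha
  have := (Option.some.inj ha).symm
  rw [this]
  exact List.set_getElem_self hn

theorem pv_getD_map {α β : Type} (xs : List α) (g : α → β) (n : Nat) (d : α)
    (hn : n < xs.length) : (xs.map g).getD n (g d) = g (xs.getD n d) := by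
  simp [List.getD_eq_getElem?_getD, List.getElem?_eq_getElem hn]

theorem pv_loop_eq (fps : List String) (pds : List (PySem.Dict String String))
    (counts : PySem.Dict String Int) (hinv : pvInv pds counts) :
    (fps.foldl (fun pds path => pvAInsert pds (pvFilename path) path) pds).map pvVals
      = (fps.foldl pvBStep (counts, pds.map pvVals)).2 := by
  induction fps generalizing pds counts with
  | nil => simp
  | cons path fps ih =>
      simp only [List.foldl_cons]
      obtain ⟨n, hle, hc, hmap⟩ := hinv (pvFilename path)
      generalize hf : pvFilename path = f at hc hmap ⊢
      by_cases hcase : n = pds.length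
      · -- append a new partition
        subst hcase
        have hmap' : pds.map (fun d => d.contains f) = List.replicate pds.length true := by
          simpa using hmap
        have hA : pvAInsert pds f path = pds ++ [PySem.Dict.empty.insert f path] :=
          pvAInsert_full pds f path hmap'
        have hB : pvBStep (counts, pds.map pvVals) path
            = (counts.insert f ((pds.length : Int) + 1), pds.map pvVals ++ [[path]]) := by
          simp [pvBStep, hf, hc]
        rw [hA, hB]
        have hval : pvVals (PySem.Dict.empty.insert f path) = [path] := rfl
        have hrw : (pds ++ [PySem.Dict.empty.insert f path]).map pvVals
            = pds.map pvVals ++ [[path]] := by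
          simp only [List.map_append, List.map_cons, List.map_nil, hval]
        rw [← hrw]
        apply ih
        intro g
        by_cases hg : g = f
        · subst hg
          refine ⟨pds.length + 1, by simp, ?_, ?_⟩
          · rw [PySem.Dict.getD_insert_self]; push_cast; ring
          · have hcf : (PySem.Dict.empty.insert g path).contains g = true := by
              rw [PySem.Dict.contains_insert]
              simp
            simp only [List.map_append, List.map_cons, List.map_nil, hmap',
              List.length_append, List.length_cons, List.length_nil, hcf]
            simp [List.replicate_succ' (n := pds.length)]
        · obtain ⟨m, hm1, hm2, hm3⟩ := hinv g
          refine ⟨m, by simp; omega, ?_, ?_⟩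
          · rw [PySem.Dict.getD_insert_of_ne counts _ _ hg]; exact hm2
          · have hgc : (PySem.Dict.empty.insert f path).contains g = false := by
              rw [PySem.Dict.contains_insert]
              simp [hg, PySem.Dict.contains_empty]
            have hrep : List.replicate (pds.length - m) false ++ [false]
                = List.replicate (pds.length + 1 - m) false := by
              rw [← List.replicate_succ' (n := pds.length - m)]
              congr 1; omega
            simp only [List.map_append, List.map_cons, List.map_nil, hm3, hgc,
              List.length_append, List.length_cons, List.length_nil, List.append_assoc]
            rw [hrep]
      · -- insert into the existing partition at index n
        have hn : n < pds.length := by omega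
        have hnc : (pds.getD n PySem.Dict.empty).contains f = false :=
          pv_not_contains pds f n hn hmap
        have hA : pvAInsert pds f path
            = pds.set n ((pds.getD n PySem.Dict.empty).insert f path) :=
          pvAInsert_at pds f path n hn hmap
        have hB : pvBStep (counts, pds.map pvVals) path
            = (counts.insert f ((n : Int) + 1),
               (pds.map pvVals).set n ((pds.map pvVals).getD n [] ++ [path])) := by
          simp only [pvBStep, hf, hc, List.length_map]
          rw [if_neg (by simp; omega)]
          simp
        rw [hA, hB]
        have hgd : (pds.map pvVals).getD n [] = pvVals (pds.getD n PySem.Dict.empty) := by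
          have h0 : ([] : List String) = pvVals PySem.Dict.empty := rfl
          rw [h0, pv_getD_map pds pvVals n _ hn]
        have hval : pvVals ((pds.getD n PySem.Dict.empty).insert f path)
            = pvVals (pds.getD n PySem.Dict.empty) ++ [path] := by
          unfold pvVals
          rw [PySem.Dict.items_insert_of_not_contains _ path hnc]
          simp
        have hrw : (pds.set n ((pds.getD n PySem.Dict.empty).insert f path)).map pvVals
            = (pds.map pvVals).set n ((pds.map pvVals).getD n [] ++ [path]) := by
          rw [hgd, ← hval, List.map_set]
        rw [← hrw]
        apply ih
        intro g
        by_cases hg : g = f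
        · subst hg
          refine ⟨n + 1, by simp; omega, ?_, ?_⟩
          · rw [PySem.Dict.getD_insert_self]; push_cast; ring
          · have hcf : ((pds.getD n PySem.Dict.empty).insert g path).contains g = true := by
              rw [PySem.Dict.contains_insert]
              simp
            rw [List.map_set, hmap, hcf, List.length_set]
            exact pv_set_boundary n pds.length hn
        · obtain ⟨m, hm1, hm2, hm3⟩ := hinv g
          refine ⟨m, by simp; omega, ?_, ?_⟩
          · rw [PySem.Dict.getD_insert_of_ne counts _ _ hg]; exact hm2
          · have hcg : ((pds.getD n PySem.Dict.empty).insert f path).contains g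
                = (pds.getD n PySem.Dict.empty).contains g := by
              rw [PySem.Dict.contains_insert]
              simp [hg]
            rw [List.map_set, hcg, List.length_set,
              pv_set_self _ n _ (by simpa using hn)
                (by simp [List.getElem?_map, List.getElem?_eq_getElem hn])]
            exact hm3

-- ===== VERDICT (by name: the statement is the Claim_ definition above) =====
theorem partition_paths_spec : Claim_equal_partition_paths := by
  intro filepaths _
  unfold Spec_partition_paths partition_paths partition_paths_alt
  have h := pv_loop_eq filepaths [] PySem.Dict.empty
    (by intro f; exact ⟨0, by simp, by simp [PySem.Dict.getD_empty], by simp⟩)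
  simpa [pvVals] using h
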